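-- pv_equiv track=rewrite | github.com/roskata551/BG_Arbitrage | Total Score Scraper/bwin_scraper.py | form_data
-- ===== SOURCE A (Python) =====
-- def form_data(score_odds):
--
--     dic = {}
--
--     i = 0
--     score = None
--     for item in score_odds:
--         i += 1
--
--         if i == 1:
--             comma_score = item
--             score = comma_score.replace(",", ".")
--             dic[score] = []
--
--         elif i == 2:
--             dic[score].append(item)
--
--         elif i == 3:
--             dic[score].append(item)
--             i = 0
--
--     return dic
-- ===== SOURCE B (Python) =====
-- def form_data(score_odds):
--     items = list(score_odds)
--     return {items[i].replace(",", "."): items[i + 1:i + 3]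
--             for i in range(0, len(items), 3)}
-- ===== Notes on version B (the rewrite author's own statement) =====
-- stated objective: idiomatic
-- what changed: Replaced A's stateful mod-3 counter with in-place list appends by a single dict comprehension that strides over indices in steps of three and takes each value as a slice items[i+1:i+3].
import Mathlib
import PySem

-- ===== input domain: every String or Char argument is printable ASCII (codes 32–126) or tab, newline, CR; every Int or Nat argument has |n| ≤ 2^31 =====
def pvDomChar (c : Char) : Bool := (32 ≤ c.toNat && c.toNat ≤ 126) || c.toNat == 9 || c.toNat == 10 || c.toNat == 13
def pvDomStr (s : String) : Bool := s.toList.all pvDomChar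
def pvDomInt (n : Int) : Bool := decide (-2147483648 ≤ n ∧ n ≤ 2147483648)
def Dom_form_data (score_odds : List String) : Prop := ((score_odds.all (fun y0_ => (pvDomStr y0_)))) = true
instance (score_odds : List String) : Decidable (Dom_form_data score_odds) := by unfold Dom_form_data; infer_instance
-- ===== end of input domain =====

-- B replaces A's stateful mod-3 counter and in-place appends by a dict comprehension
-- striding over indices in steps of three (objective: more idiomatic; same cost).


-- ===== PORT A =====
-- loop body of A: state is (dic, i, score) exactly as in the Python
-- dic[score].append(item) is ported as Dict.modify score [] (· ++ [item]): exact here, since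
-- whenever the i==2 / i==3 branches run, score was set and inserted by the i==1 branch of the
-- same pass (i cycles 1,2,3), so the key is always present; the 'none' match arm is unreachable.
def form_data_step (st : PySem.Dict String (List String) × Int × Option String)
    (item : String) : PySem.Dict String (List String) × Int × Option String :=
  let i := st.2.1 + 1
  if i == 1 then
    let score := PySem.Str.replace item "," "."
    (st.1.insert score [], i, some score)
  else if i == 2 then
    (match st.2.2 with
     | some k => st.1.modify k [] (fun v => v ++ [item])
     | none => st.1, i, st.2.2)
  else if i == 3 then
    (match st.2.2 with
     | some k => st.1.modify k [] (fun v => v ++ [item])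
     | none => st.1, 0, st.2.2)
  else (st.1, i, st.2.2)

def form_data (score_odds : List String) : List (String × List String) :=
  (score_odds.foldl form_data_step (PySem.Dict.empty, 0, none)).1.items

-- ===== PORT B =====
def form_data_alt (score_odds : List String) : List (String × List String) :=
  let items := score_odds
  ((PySem.List.pyRange 0 (items.length : Int) 3).foldl
    (fun d i =>
      d.insert (PySem.Str.replace (PySem.List.pyGetD items i "") "," ".")
        (PySem.List.slice items (some (i + 1)) (some (i + 3))))
    PySem.Dict.empty).items

-- ===== PRECONDITION & SPEC =====
def Spec_form_data (score_odds : List String) (out : List (String × List String)) : Prop := out = form_data_alt score_odds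
instance (score_odds : List String) (out : List (String × List String)) : Decidable (Spec_form_data score_odds out) := by unfold Spec_form_data; infer_instance

-- ===== CLAIM (what is proved, stated in full; the proofs are below) =====
def Claim_equal_form_data : Prop := ∀ (score_odds : List String), Dom_form_data score_odds → Spec_form_data score_odds (form_data score_odds)

-- ===== LEMMAS AND PROOFS =====

-- the common reference: consume the list three items at a time
def form_data_chunk : PySem.Dict String (List String) → List String → PySem.Dict String (List String)
  | d, [] => d
  | d, [a] => d.insert (PySem.Str.replace a "," ".") []
  | d, [a, b] => d.insert (PySem.Str.replace a "," ".") [b]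
  | d, a :: b :: c :: rest =>
      form_data_chunk (d.insert (PySem.Str.replace a "," ".") [b, c]) rest

theorem foldA_eq_chunk (xs : List String) :
    ∀ d s, (xs.foldl form_data_step (d, 0, s)).1 = form_data_chunk d xs := by
  match xs with
  | [] => intro d s; rfl
  | [a] =>
      intro d s
      simp [form_data_step, form_data_chunk]
  | [a, b] =>
      intro d s
      simp [form_data_step, form_data_chunk, PySem.Dict.modify,
        PySem.Dict.getD_insert_self, PySem.Dict.insert_insert_self]
  | a :: b :: c :: rest =>
      intro d s
      have ih := foldA_eq_chunk rest
      simp only [List.foldl_cons]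
      have h3 : form_data_step (form_data_step (form_data_step (d, 0, s) a) b) c
          = (d.insert (PySem.Str.replace a "," ".") [b, c], 0,
              some (PySem.Str.replace a "," ".")) := by
        simp [form_data_step, PySem.Dict.modify,
          PySem.Dict.getD_insert_self, PySem.Dict.insert_insert_self]
      rw [h3, ih, form_data_chunk]

theorem range3_cons (n : Int) (h : 0 < n) :
    PySem.List.pyRange 0 n 3 =
      0 :: (PySem.List.pyRange 0 (n - 3) 3).map (fun i => i + 3) := by
  rw [PySem.List.pyRange_of_pos _ _ (by norm_num : (0:Int) < 3),
      PySem.List.pyRange_of_pos _ _ (by norm_num : (0:Int) < 3)]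
  have hk : (if (0:Int) < n then ((n - 0 + 3 - 1) / 3).toNat else 0)
      = (if (0:Int) < n - 3 then ((n - 3 - 0 + 3 - 1) / 3).toNat else 0) + 1 := by
    split_ifs <;> omega
  rw [hk, List.range_succ_eq_map]
  simp [List.map_map, Function.comp]
  intros
  trivial

theorem foldB_eq_chunk (xs : List String) :
    ∀ d, (PySem.List.pyRange 0 (xs.length : Int) 3).foldl
        (fun d i =>
          d.insert (PySem.Str.replace (PySem.List.pyGetD xs i "") "," ".")
            (PySem.List.slice xs (some (i + 1)) (some (i + 3)))) d
      = form_data_chunk d xs := by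
  match xs with
  | [] => intro d; rfl
  | [a] =>
      intro d
      rw [range3_cons _ (by norm_num)]
      norm_num [PySem.List.pyRange_of_pos _ _ (by norm_num : (0:Int) < 3)]
      simp [form_data_chunk, PySem.List.slice_toNat]
  | [a, b] =>
      intro d
      rw [range3_cons _ (by norm_num)]
      norm_num [PySem.List.pyRange_of_pos _ _ (by norm_num : (0:Int) < 3)]
      simp [form_data_chunk, PySem.List.slice_toNat]
  | a :: b :: c :: rest =>
      intro d
      have ih := foldB_eq_chunk rest
      have hn : ((a :: b :: c :: rest).length : Int) = (rest.length : Int) + 3 := by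
        simp; omega
      rw [hn, range3_cons _ (by positivity)]
      simp only [List.foldl_cons, List.foldl_map, add_sub_cancel_right]
      have h0 : (d.insert
          (PySem.Str.replace (PySem.List.pyGetD (a :: b :: c :: rest) 0 "") "," ".")
          (PySem.List.slice (a :: b :: c :: rest) (some (0 + 1)) (some (0 + 3))))
          = d.insert (PySem.Str.replace a "," ".") [b, c] := by
        norm_num [PySem.List.pyGetD_zero_cons, PySem.List.slice_toNat]
        rfl
      rw [h0]
      rw [PySem.List.foldl_congr_mem _ _
        (fun d i =>
          d.insert (PySem.Str.replace (PySem.List.pyGetD rest i "") "," ".")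
            (PySem.List.slice rest (some (i + 1)) (some (i + 3)))) _ ?_]
      · rw [ih, form_data_chunk]
      · intro acc i hi
        have h0i : 0 ≤ i := ((PySem.List.mem_pyRange_iff_of_pos (by norm_num) i).1 hi).1
        obtain ⟨k, rfl⟩ : ∃ k : Nat, i = (k : Int) := ⟨i.toNat, (Int.toNat_of_nonneg h0i).symm⟩
        have e1 : PySem.List.pyGetD (a :: b :: c :: rest) ((k : Int) + 3) ""
            = PySem.List.pyGetD rest (k : Int) "" := by
          have : ((k : Int) + 3) = ((k + 3 : Nat) : Int) := by push_cast; ring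
          rw [this, PySem.List.pyGetD_natCast, PySem.List.pyGetD_natCast]
          simp [List.getD]
        have e2 : PySem.List.slice (a :: b :: c :: rest)
              (some ((k : Int) + 3 + 1)) (some ((k : Int) + 3 + 3))
            = PySem.List.slice rest (some ((k : Int) + 1)) (some ((k : Int) + 3)) := by
          have h1 : ((k : Int) + 3 + 1) = ((k + 4 : Nat) : Int) := by push_cast; ring
          have h2 : ((k : Int) + 3 + 3) = ((k + 6 : Nat) : Int) := by push_cast; ring
          have h3 : ((k : Int) + 1) = ((k + 1 : Nat) : Int) := by push_cast; ring
          have h4 : ((k : Int) + 3) = ((k + 3 : Nat) : Int) := by push_cast; ring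
          rw [h1, h2, h3, h4, PySem.List.slice_natCast, PySem.List.slice_natCast]
          have : (a :: b :: c :: rest).drop (k + 4) = rest.drop (k + 1) := by
            simp [List.drop_succ_cons]
          rw [this]
          congr 1
          omega
        rw [e1, e2]

-- ===== VERDICT (by name: the statement is the Claim_ definition above) =====
theorem form_data_spec : Claim_equal_form_data := by
  intro xs _
  unfold Spec_form_data form_data
  rw [foldA_eq_chunk]
  exact congrArg PySem.Dict.items (foldB_eq_chunk xs PySem.Dict.empty).symm
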